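-- pv_equiv track=rewrite | github.com/Ansonator/learning-python | LCM.py | find_index_of_largest
-- ===== SOURCE A (Python) =====
-- def find_index_of_largest(numbers):
--     largest_index = 0
--     largest = numbers[largest_index]
--     for i in range(1,len(numbers)):
--         if (numbers[i] > largest):
--             largest = numbers[i]
--             largest_index = i
--     return (largest_index)
-- ===== SOURCE B (Python) =====
-- def find_index_of_largest(numbers):
--     largest = numbers[0]
--     for x in numbers:
--         if x > largest:
--             largest = x
--     for i in range(len(numbers)):
--         if numbers[i] == largest:
--             return i
-- ===== Notes on version B (the rewrite author's own statement) =====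
-- stated objective: alternative
-- what changed: Two separate passes: first compute the maximum value, then locate the first index holding it, instead of tracking value and index together in one loop.
import Mathlib
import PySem

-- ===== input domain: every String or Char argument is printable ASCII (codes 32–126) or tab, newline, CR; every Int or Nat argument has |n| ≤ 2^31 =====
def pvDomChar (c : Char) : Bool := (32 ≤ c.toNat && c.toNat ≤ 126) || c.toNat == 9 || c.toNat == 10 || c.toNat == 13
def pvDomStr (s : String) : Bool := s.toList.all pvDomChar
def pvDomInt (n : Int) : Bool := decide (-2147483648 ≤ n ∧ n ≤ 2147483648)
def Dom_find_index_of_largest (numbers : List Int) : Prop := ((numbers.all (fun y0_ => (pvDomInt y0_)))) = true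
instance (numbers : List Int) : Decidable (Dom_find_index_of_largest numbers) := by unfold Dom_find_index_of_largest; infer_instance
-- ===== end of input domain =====

-- B computes the maximum in one pass and then locates its first index in a second pass,
-- instead of A's single loop tracking value and index together (alternative decomposition, same cost).

-- ===== PORT A =====
-- one loop over range(1, len), state (largest_index, largest)
def find_index_of_largest (numbers : List Int) : Int :=
  (((PySem.List.pyRange 1 (numbers.length : Int) 1).foldl
      (fun s i =>
        if PySem.List.pyGetD numbers i 0 > s.2 then (i, PySem.List.pyGetD numbers i 0) else s)
      (0, PySem.List.pyGetD numbers 0 0))).1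

-- ===== PORT B =====
-- first loop: running maximum over the elements; second loop: first index i with numbers[i] == largest
def find_index_of_largest_alt (numbers : List Int) : Int :=
  let largest := numbers.foldl (fun l x => if x > l then x else l) (PySem.List.pyGetD numbers 0 0)
  (((PySem.List.pyRange 0 (numbers.length : Int) 1).find?
      (fun i => PySem.List.pyGetD numbers i 0 == largest)).getD 0)

-- ===== PRECONDITION & SPEC =====
-- Pre_ excludes only the empty list, on which both Pythons raise IndexError at the initial element access.
def Pre_find_index_of_largest (numbers : List Int) : Prop := numbers ≠ []
instance (numbers : List Int) : Decidable (Pre_find_index_of_largest numbers) := by unfold Pre_find_index_of_largest; infer_instance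
def pvWitness_find_index_of_largest : List Int := ([3, 1, 3])

def Spec_find_index_of_largest (numbers : List Int) (out : Int) : Prop := out = find_index_of_largest_alt numbers
instance (numbers : List Int) (out : Int) : Decidable (Spec_find_index_of_largest numbers out) := by unfold Spec_find_index_of_largest; infer_instance

-- ===== CLAIM (what is proved, stated in full; the proofs are below) =====
def Claim_equal_find_index_of_largest : Prop := ∀ (numbers : List Int), Dom_find_index_of_largest numbers → Pre_find_index_of_largest numbers → Spec_find_index_of_largest numbers (find_index_of_largest numbers)

-- ===== LEMMAS AND PROOFS =====

-- the A-side loop body, on (index, value) pairs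
def pvStep (s p : Int × Int) : Int × Int := if p.2 > s.2 then p else s

-- find? only looks at members
theorem pv_find?_congr_mem {α : Type} (l : List α) (p q : α → Bool)
    (h : ∀ x ∈ l, p x = q x) : l.find? p = l.find? q := by
  induction l with
  | nil => rfl
  | cons a t ih =>
    simp only [List.find?_cons, h a (List.mem_cons_self ..)]
    cases q a
    · exact ih fun x hx => h x (List.mem_cons_of_mem _ hx)
    · rfl

-- characterisation of the A-side fold over enumerated elements
theorem pv_foldA_char (t : List Int) : ∀ (j i0 m : Int),
    (PySem.List.enumerate t j).foldl pvStep (i0, m) =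
      if t.foldl max m > m then ((j + (t.findIdx (· == t.foldl max m) : Int)), t.foldl max m)
      else (i0, m) := by
  induction t with
  | nil => intro j i0 m; simp [PySem.List.enumerate_nil]
  | cons x ts ih =>
    intro j i0 m
    have hxle : x ≤ ts.foldl max x := (PySem.List.le_foldl_max ts x).1
    rw [PySem.List.enumerate_cons, List.foldl_cons]
    have hstep : pvStep (i0, m) (j, x) = if x > m then (j, x) else (i0, m) := rfl
    rw [hstep]
    by_cases hx : x > m
    · rw [if_pos hx, ih]
      have hfold : (x :: ts).foldl max m = ts.foldl max x := by
        simp [List.foldl_cons, max_eq_right (le_of_lt hx)]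
      rw [List.foldl_cons] at hfold ⊢
      rw [max_eq_right (le_of_lt hx)] at hfold ⊢
      by_cases hT : ts.foldl max x > x
      · rw [if_pos hT, if_pos (lt_trans hx hT)]
        have hne : (x == ts.foldl max x) = false := by
          simp only [beq_eq_false_iff_ne, ne_eq]; omega
        rw [List.findIdx_cons, hne]
        simp only [cond_false, Prod.mk.injEq]
        exact ⟨by push_cast; omega, trivial⟩
      · have hTx : ts.foldl max x = x := le_antisymm (by omega) hxle
        rw [if_neg hT, if_pos (by omega : ts.foldl max x > m)]
        rw [hTx, List.findIdx_cons]
        simp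
    · rw [if_neg hx, ih]
      have hfold : ts.foldl max (max m x) = ts.foldl max m := by
        rw [max_eq_left (by omega : x ≤ m)]
      rw [List.foldl_cons, hfold]
      by_cases hT : ts.foldl max m > m
      · rw [if_pos hT, if_pos hT]
        have hne : (x == ts.foldl max m) = false := by
          simp only [beq_eq_false_iff_ne, ne_eq]; omega
        rw [List.findIdx_cons, hne]
        simp only [cond_false, Prod.mk.injEq]
        exact ⟨by push_cast; omega, trivial⟩
      · rw [if_neg hT, if_neg hT]

-- characterisation of the B-side search over enumerated elements
theorem pv_enum_find (xs : List Int) (M : Int) : ∀ (j : Int),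
    (PySem.List.enumerate xs j).find? (fun q => q.2 == M) =
      if M ∈ xs then some ((j + (xs.findIdx (· == M) : Int)), M) else none := by
  induction xs with
  | nil => intro j; simp [PySem.List.enumerate_nil]
  | cons x ts ih =>
    intro j
    rw [PySem.List.enumerate_cons, List.find?_cons]
    by_cases hx : x = M
    · subst hx
      simp [List.findIdx_cons]
    · have hb : ((j, x).2 == M) = false := by simp [hx]
      simp only [hb]
      rw [ih (j + 1)]
      by_cases hm : M ∈ ts
      · rw [if_pos hm, if_pos (List.mem_cons_of_mem _ hm)]
        have hne : (x == M) = false := by simp [hx]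
        rw [List.findIdx_cons, hne]
        simp only [cond_false]
        congr 2
        push_cast; omega
      · rw [if_neg hm, if_neg (by simp [hm]; exact fun h => hx h.symm)]

-- ===== VERDICT (by name: the statement is the Claim_ definition above) =====
theorem find_index_of_largest_spec : Claim_equal_find_index_of_largest := by
  intro numbers _ hpre
  unfold Spec_find_index_of_largest
  obtain ⟨a, t, rfl⟩ : ∃ a t, numbers = a :: t := by
    cases numbers with
    | nil => exact absurd rfl hpre
    | cons a t => exact ⟨a, t, rfl⟩
  have hxle : a ≤ t.foldl max a := (PySem.List.le_foldl_max t a).1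
  -- A side: the range-indexed fold is the fold of pvStep over enumerate t 1
  have hrangeA : PySem.List.pyRange 1 (((a :: t).length : Nat) : Int) 1 =
      (PySem.List.enumerate t 1).map (·.1) := by
    rw [PySem.List.map_fst_enumerate]
    congr 1
    push_cast [List.length_cons]
    ring
  have hA : find_index_of_largest (a :: t) =
      ((PySem.List.enumerate t 1).foldl pvStep (0, a)).1 := by
    unfold find_index_of_largest
    rw [PySem.List.pyGetD_zero_cons, hrangeA, List.foldl_map]
    congr 1
    apply PySem.List.foldl_congr_mem
    intro s q hq
    obtain ⟨k, hk, rfl⟩ := (PySem.List.mem_enumerate_iff _ _ _).1 hq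
    have hget : PySem.List.pyGetD (a :: t) ((1 : Int) + (k : Int)) 0 = t[k] := by
      have hidx : (1 : Int) + (k : Int) = ((k + 1 : Nat) : Int) := by push_cast; ring
      rw [hidx, PySem.List.pyGetD_natCast, List.getD_cons_succ]
      exact List.getD_eq_getElem _ _ hk
    simp [pvStep, hget]
  -- B side: the running maximum is t.foldl max a
  have hmaxfun : (fun l x : Int => if x > l then x else l) = fun l x => max l x := by
    funext l x; rw [max_def]; split_ifs <;> omega
  have hBfold : (a :: t).foldl (fun l x => if x > l then x else l)
      (PySem.List.pyGetD (a :: t) 0 0) = t.foldl max a := by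
    rw [PySem.List.pyGetD_zero_cons, hmaxfun]
    simp
  have hTmem : t.foldl max a ∈ a :: t := by
    rcases PySem.List.foldl_max_mem t a with h | h
    · rw [h]; exact List.mem_cons_self ..
    · exact List.mem_cons_of_mem _ h
  have hrangeB : PySem.List.pyRange 0 (((a :: t).length : Nat) : Int) 1 =
      (PySem.List.enumerate (a :: t) 0).map (·.1) := by
    rw [PySem.List.map_fst_enumerate]
    congr 1
    ring
  have hB : find_index_of_largest_alt (a :: t) =
      ((0 : Int) + (((a :: t).findIdx (· == t.foldl max a)) : Int)) := by
    simp only [find_index_of_largest_alt]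
    rw [hBfold, hrangeB, List.find?_map]
    have hcong : (PySem.List.enumerate (a :: t) 0).find?
        ((fun i => PySem.List.pyGetD (a :: t) i 0 == t.foldl max a) ∘ (·.1)) =
        (PySem.List.enumerate (a :: t) 0).find? (fun q => q.2 == t.foldl max a) := by
      apply pv_find?_congr_mem
      intro q hq
      obtain ⟨k, hk, rfl⟩ := (PySem.List.mem_enumerate_iff _ _ _).1 hq
      have hget : PySem.List.pyGetD (a :: t) ((0 : Int) + (k : Int)) 0 = (a :: t)[k] := by
        have hidx : (0 : Int) + (k : Int) = ((k : Nat) : Int) := by ring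
        rw [hidx, PySem.List.pyGetD_natCast]
        exact List.getD_eq_getElem _ _ hk
      simp only [Function.comp_apply, hget]
    rw [hcong, pv_enum_find (a :: t) (t.foldl max a) 0, if_pos hTmem]
    rfl
  -- combine
  rw [hA, hB, pv_foldA_char]
  by_cases hgt : t.foldl max a > a
  · rw [if_pos hgt]
    have hne : (a == t.foldl max a) = false := by
      simp only [beq_eq_false_iff_ne, ne_eq]; omega
    rw [List.findIdx_cons, hne]
    simp only [cond_false]
    push_cast
    ring
  · rw [if_neg hgt]
    have heq : (a == t.foldl max a) = true := by
      simp only [beq_iff_eq]; omega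
    rw [List.findIdx_cons, heq]
    simp
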